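-- pv_equiv track=rewrite | github.com/jstoxrocky/0x2048-game | game/mechanics.py | transform_back
-- ===== SOURCE A (Python) =====
-- UP = 1
--
-- DOWN = 2
--
-- LEFT = 3
--
-- def transpose(matrix):
--     """
--     Performs a matrix transpose
--     """
--     transposition = [list(row) for row in zip(*matrix)]
--     return transposition
--
-- def transform_back(board, direction):
--     """
--     Reverses the transformation performed by the `transform` function,
--     getting out original board setup back
--     """
--     if direction in {UP}:
--         board = [row[::-1] for row in board]
--         board = transpose(board)
--     if direction in {DOWN}:
--         board = transpose(board)
--         board = [row[::-1] for row in board]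
--     if direction in {LEFT}:
--         board = [row[::-1] for row in board]
--     return board
-- ===== SOURCE B (Python) =====
-- UP = 1
--
-- DOWN = 2
--
-- LEFT = 3
--
-- def transform_back(board, direction):
--     if direction == UP:
--         c = len(board[0]) if board else 0
--         return [[row[-1 - i] for row in board] for i in range(c)]
--     if direction == DOWN:
--         r = len(board)
--         c = len(board[0]) if board else 0
--         return [[board[r - 1 - j][i] for j in range(r)] for i in range(c)]
--     if direction == LEFT:
--         return [row[::-1] for row in board]
--     return board
-- ===== Notes on version B (the rewrite author's own statement) =====
-- stated objective: alternative
-- what changed: Replaces the chained row-reversal/zip-transpose passes with one direct index-mapping comprehension per direction; Pre_ excludes boards whose first row is longer than some later row under UP/DOWN, where A's zip-transpose silently truncates while B's direct indexing raises IndexError.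
-- outside the precondition, e.g. on transform_back([[1, 2], [3]], 1): A returns [[2, 3]], B raises IndexError; on transform_back([[1, 2], [3]], 2): A returns [[3, 1]], B raises IndexError
import Mathlib
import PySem

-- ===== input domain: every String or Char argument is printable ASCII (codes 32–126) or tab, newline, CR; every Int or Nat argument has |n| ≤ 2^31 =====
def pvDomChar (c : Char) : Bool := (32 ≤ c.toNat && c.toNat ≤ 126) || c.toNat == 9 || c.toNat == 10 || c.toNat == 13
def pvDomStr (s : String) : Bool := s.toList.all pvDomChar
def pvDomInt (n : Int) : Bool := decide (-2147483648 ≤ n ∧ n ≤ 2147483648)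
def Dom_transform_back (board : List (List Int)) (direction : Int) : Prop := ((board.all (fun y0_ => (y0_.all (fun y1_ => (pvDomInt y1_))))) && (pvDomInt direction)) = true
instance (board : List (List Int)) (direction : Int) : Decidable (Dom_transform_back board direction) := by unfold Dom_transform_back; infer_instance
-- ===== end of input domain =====

-- B replaces A's chained row-reversal/zip-transpose passes with direct index-mapping
-- comprehensions per direction (a different decomposition, same cost); B raises where
-- A's zip silently truncates ragged boards, so Pre_ excludes those inputs.


-- ===== PORT A =====
-- row[::-1]  (exact: slice? with step -1 never returns none)
def pyRevRow (row : List Int) : List Int := (PySem.List.slice? row none none (-1)).getD []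

-- termination helper for pyTranspose (cited by name in decreasing_by)
theorem pvSumTailLt (m : List (List Int)) (h1 : m ≠ []) (h2 : ∀ r ∈ m, r ≠ []) :
    ((m.map List.tail).map List.length).sum < (m.map List.length).sum := by
  induction m with
  | nil => exact absurd rfl h1
  | cons r rs ih =>
    have hr : r ≠ [] := h2 r (by simp)
    have hlen : r.tail.length < r.length := by
      cases r with
      | nil => exact absurd rfl hr
      | cons a l => simp
    have hle : ((rs.map List.tail).map List.length).sum ≤ (rs.map List.length).sum := by
      rcases eq_or_ne rs [] with h | h
      · simp [h]
      · exact le_of_lt (ih h (fun x hx => h2 x (by simp [hx])))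
    simp only [List.map_cons, List.sum_cons]
    omega

-- [list(row) for row in zip(*matrix)]  (Python zip truncates to the shortest row;
-- zip of no iterables — and zip with an exhausted iterable — yields nothing)
def pyTranspose (m : List (List Int)) : List (List Int) :=
  if h : m = [] ∨ m.any List.isEmpty then []
  else (m.map (fun r => r.headI)) :: pyTranspose (m.map List.tail)
termination_by (m.map List.length).sum
decreasing_by
  push_neg at h
  have := pvSumTailLt m h.1 (by
    intro r hr hre
    exact h.2 ((List.any_eq_true).mpr ⟨r, hr, by simp [hre]⟩))
  simpa using this

def transform_back (board : List (List Int)) (direction : Int) : List (List Int) :=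
  let b1 := if direction = 1 then pyTranspose (board.map pyRevRow) else board
  let b2 := if direction = 2 then (pyTranspose b1).map pyRevRow else b1
  let b3 := if direction = 3 then b2.map pyRevRow else b2
  b3

-- ===== PORT B =====
-- len(board[0]) if board else 0
def headLenB (board : List (List Int)) : Nat :=
  match board with
  | [] => 0
  | r :: _ => r.length

-- row[-1 - i] and board[r - 1 - j][i] are ported with pyGet? (negative-index exact);
-- under Pre_ every index is in range, so .getD only totalises
def transform_back_alt (board : List (List Int)) (direction : Int) : List (List Int) :=
  if direction = 1 then
    (List.range (headLenB board)).map (fun (i : Nat) =>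
      board.map (fun row => (PySem.List.pyGet? row (-1 - (i : Int))).getD 0))
  else if direction = 2 then
    let r := board.length
    (List.range (headLenB board)).map (fun (i : Nat) =>
      (List.range r).map (fun (j : Nat) =>
        (PySem.List.pyGet? ((PySem.List.pyGet? board ((r : Int) - 1 - (j : Int))).getD [])
          (i : Int)).getD 0))
  else if direction = 3 then
    board.map (fun row => row.reverse)
  else board

-- ===== PRECONDITION & SPEC =====
-- Pre_ excludes ragged boards (some row shorter than the first) under UP/DOWN: there A's
-- zip-transpose silently truncates while B raises IndexError.
def Pre_transform_back (board : List (List Int)) (direction : Int) : Prop :=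
  (direction = 1 ∨ direction = 2) → ∀ row ∈ board, board.headI.length ≤ row.length
instance (board : List (List Int)) (direction : Int) : Decidable (Pre_transform_back board direction) := by unfold Pre_transform_back; infer_instance

def pvWitness_transform_back : List (List Int) × Int := ([[1, 2], [3, 4]], 1)

def Spec_transform_back (board : List (List Int)) (direction : Int) (out : List (List Int)) : Prop := out = transform_back_alt board direction
instance (board : List (List Int)) (direction : Int) (out : List (List Int)) : Decidable (Spec_transform_back board direction out) := by unfold Spec_transform_back; infer_instance

-- ===== CLAIM (what is proved, stated in full; the proofs are below) =====
def Claim_equal_transform_back : Prop := ∀ (board : List (List Int)) (direction : Int), Dom_transform_back board direction → Pre_transform_back board direction → Spec_transform_back board direction (transform_back board direction)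

-- ===== LEMMAS AND PROOFS =====

theorem pvRevRow_eq (row : List Int) : pyRevRow row = row.reverse := by
  simp [pyRevRow, PySem.List.slice?_none_none_neg_one]

-- min over row lengths, used only to characterise A's zip truncation
def minLenB (board : List (List Int)) : Nat :=
  match board.map (fun r => r.length) with
  | [] => 0
  | x :: t => t.foldl min x

theorem pvFoldlMin_le_init (l : List Nat) (a : Nat) : l.foldl min a ≤ a := by
  induction l generalizing a with
  | nil => simp
  | cons b t ih => exact le_trans (ih (min a b)) (by omega)

theorem pvFoldlMin_le_mem (l : List Nat) (a x : Nat) (hx : x ∈ l) : l.foldl min a ≤ x := by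
  induction l generalizing a with
  | nil => simp at hx
  | cons b t ih =>
    rcases List.mem_cons.mp hx with h | h
    · subst h; exact le_trans (pvFoldlMin_le_init t (min a x)) (by omega)
    · exact ih (min a b) h

theorem pvFoldlMin_eq_init (l : List Nat) (a : Nat) (h : ∀ x ∈ l, a ≤ x) :
    l.foldl min a = a := by
  induction l with
  | nil => simp
  | cons b t ih =>
    have hb : a ≤ b := h b (by simp)
    simp only [List.foldl_cons, min_eq_left hb]
    exact ih (fun x hx => h x (by simp [hx]))

theorem pvMinLenB_le (board : List (List Int)) (r : List Int) (hr : r ∈ board) :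
    minLenB board ≤ r.length := by
  unfold minLenB
  cases board with
  | nil => simp at hr
  | cons s t =>
    simp only [List.map_cons]
    rcases List.mem_cons.mp hr with h | h
    · subst h; exact pvFoldlMin_le_init _ _
    · exact pvFoldlMin_le_mem _ _ _ (List.mem_map_of_mem h)

-- under Pre_ the shortest-row truncation is no truncation: min length = first row's length
theorem pvMinLenB_eq_headLen (board : List (List Int))
    (h : ∀ row ∈ board, board.headI.length ≤ row.length) :
    minLenB board = headLenB board := by
  cases board with
  | nil => rfl
  | cons r rs =>
    unfold minLenB headLenB
    simp only [List.map_cons]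
    apply pvFoldlMin_eq_init
    intro x hx
    simp only [List.mem_map] at hx
    obtain ⟨s, hs, rfl⟩ := hx
    simpa using h s (by simp [hs])

theorem pvFoldlMin_pred (l : List Nat) (a : Nat) (ha : 1 ≤ a) (hl : ∀ x ∈ l, 1 ≤ x) :
    l.foldl min a = (l.map (fun x => x - 1)).foldl min (a - 1) + 1 := by
  induction l generalizing a with
  | nil => simp; omega
  | cons b t ih =>
    have hb : 1 ≤ b := hl b (by simp)
    simp only [List.map_cons, List.foldl_cons]
    have : min (a - 1) (b - 1) = min a b - 1 := by omega
    rw [this, ih (min a b) (by omega) (fun x hx => hl x (by simp [hx]))]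

theorem pvMinLenB_tail (m : List (List Int)) (h1 : m ≠ []) (h2 : ∀ r ∈ m, r ≠ []) :
    minLenB m = minLenB (m.map List.tail) + 1 := by
  cases m with
  | nil => exact absurd rfl h1
  | cons r rs =>
    have hr1 : 1 ≤ r.length := by
      have := h2 r (by simp); cases r with
      | nil => exact absurd rfl this
      | cons a l => simp
    unfold minLenB
    simp only [List.map_cons, List.map_map]
    rw [pvFoldlMin_pred _ r.length hr1 (by
      intro x hx
      simp only [List.mem_map] at hx
      obtain ⟨s, hs, rfl⟩ := hx
      have := h2 s (by simp [hs])
      cases s with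
      | nil => exact absurd rfl this
      | cons a l => simp)]
    simp only [List.map_map]
    have hmap : rs.map ((fun x => x - 1) ∘ fun r => r.length) = rs.map ((fun r => r.length) ∘ List.tail) :=
      List.map_congr_left (fun s _ => by simp [List.length_tail])
    rw [hmap]
    simp [List.length_tail]

theorem pvGetD_succ_tail (r : List Int) (i : Nat) : r.getD (i + 1) 0 = r.tail.getD i 0 := by
  cases r <;> simp [List.getD]

theorem pvTranspose_eq (m : List (List Int)) :
    pyTranspose m = (List.range (minLenB m)).map (fun i => m.map (fun r => r.getD i 0)) := by
  generalize hN : (m.map List.length).sum = N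
  induction N using Nat.strong_induction_on generalizing m with
  | _ N ih =>
  subst hN
  by_cases h : m = [] ∨ m.any List.isEmpty
  · rw [pyTranspose.eq_def]
    simp only [dif_pos h]
    rcases h with h | h
    · subst h; simp [minLenB]
    · simp only [List.any_eq_true] at h
      obtain ⟨r, hr, hre⟩ := h
      have : minLenB m = 0 := by
        have := pvMinLenB_le m r hr
        simp only [List.isEmpty_iff] at hre
        subst hre; simpa using this
      simp [this]
  · push_neg at h
    have h2 : ∀ r ∈ m, r ≠ [] := by
      intro r hr hre
      exact h.2 ((List.any_eq_true).mpr ⟨r, hr, by simp [hre]⟩)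
    rw [pyTranspose.eq_def]
    rw [dif_neg (by push_neg; exact h)]
    rw [ih _ (pvSumTailLt m h.1 h2) _ rfl, pvMinLenB_tail m h.1 h2, List.range_succ_eq_map]
    simp only [List.map_cons, List.map_map]
    congr 1
    · apply List.map_congr_left
      intro r _
      cases r <;> simp [List.getD]
    · apply List.map_congr_left
      intro i _
      simp only [Function.comp]
      apply List.map_congr_left
      intro r _
      exact (pvGetD_succ_tail r i).symm

theorem pvReverse_eq_range_map (l : List (List Int)) (i : Nat) :
    (l.map (fun r => r.getD i 0)).reverse =
      (List.range l.length).map (fun j => (l.getD (l.length - 1 - j) []).getD i 0) := by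
  apply List.ext_getElem
  · simp
  · intro j h1 h2
    simp only [List.length_reverse, List.length_map] at h1
    simp only [List.getElem_reverse, List.getElem_map, List.getElem_range]
    rw [List.getD_eq_getElem l [] (by omega)]
    simp only [List.length_map]

theorem pvMinLenB_rev (board : List (List Int)) :
    minLenB (board.map pyRevRow) = minLenB board := by
  unfold minLenB
  cases board with
  | nil => simp
  | cons r rs =>
    simp only [List.map_cons, List.map_map, pvRevRow_eq, List.length_reverse]
    congr 1
    exact List.map_congr_left (fun s _ => by simp [pvRevRow_eq])

-- row[-1-i] = reversed(row)[i] when i < len(row)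
theorem pvPyGetNeg_eq_revGetD (row : List Int) (i : Nat) (hi : i < row.length) :
    (PySem.List.pyGet? row (-1 - (i : Int))).getD 0 = row.reverse.getD i 0 := by
  simp only [PySem.List.pyGet?, PySem.List.pyIdx?]
  rw [if_neg (by omega : ¬ (0 ≤ -1 - (i : Int))),
      if_pos (by omega : -(row.length : Int) ≤ -1 - (i : Int))]
  have h2 : row.length - (-(-1 - (i:Int))).toNat = row.length - 1 - i := by omega
  rw [h2]
  simp only [Option.bind_some]
  rw [List.getElem?_eq_getElem (by omega : row.length - 1 - i < row.length)]
  rw [List.getD_eq_getElem row.reverse 0 (by simpa using hi), List.getElem_reverse]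
  simp

theorem transform_back_spec_aux (board : List (List Int)) (direction : Int)
    (hpre : Pre_transform_back board direction) :
    transform_back board direction = transform_back_alt board direction := by
  unfold transform_back transform_back_alt
  by_cases h1 : direction = 1
  · have hrect := hpre (by left; exact h1)
    simp only [h1, if_neg (by decide : (1 : Int) ≠ 2), if_neg (by decide : (1 : Int) ≠ 3)]
    rw [pvTranspose_eq, pvMinLenB_rev, pvMinLenB_eq_headLen board hrect]
    apply List.map_congr_left
    intro i hi
    simp only [List.mem_range] at hi
    simp only [List.map_map]
    apply List.map_congr_left
    intro r hr
    have hhead : headLenB board ≤ r.length := by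
      have := hrect r hr
      cases board with
      | nil => simp at hr
      | cons s t => simpa [headLenB] using this
    have hil : i < r.length := lt_of_lt_of_le hi hhead
    simp only [Function.comp, pvRevRow_eq]
    exact (pvPyGetNeg_eq_revGetD r i hil).symm
  · by_cases h2 : direction = 2
    · have hrect := hpre (by right; exact h2)
      simp only [h2, if_neg (by decide : (2 : Int) ≠ 1), if_neg (by decide : (2 : Int) ≠ 3)]
      rw [pvTranspose_eq, pvMinLenB_eq_headLen board hrect]
      simp only [List.map_map]
      apply List.map_congr_left
      intro i _
      simp only [Function.comp, pvRevRow_eq]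
      rw [pvReverse_eq_range_map board i]
      apply List.map_congr_left
      intro j hj
      simp only [List.mem_range] at hj
      have hidx : ((board.length : Int) - 1 - (j : Int)) = ((board.length - 1 - j : Nat) : Int) := by
        omega
      rw [hidx, PySem.List.pyGet?_natCast, PySem.List.pyGet?_natCast]
      rw [List.getElem?_eq_getElem (by omega : board.length - 1 - j < board.length)]
      simp only [Option.getD_some]
      rw [List.getD_eq_getElem board [] (by omega)]
      rcases Nat.lt_or_ge i (board[board.length - 1 - j]'(by omega)).length with hlt | hge
      · rw [List.getElem?_eq_getElem hlt, List.getD_eq_getElem _ 0 hlt]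
        simp
      · rw [List.getElem?_eq_none hge, List.getD_eq_default _ 0 hge]
        simp
    · by_cases h3 : direction = 3
      · simp only [h3, if_neg (by decide : (3 : Int) ≠ 1), if_neg (by decide : (3 : Int) ≠ 2)]
        apply List.map_congr_left
        intro r _
        exact pvRevRow_eq r
      · simp [h1, h2, h3]

-- ===== VERDICT (by name: the statement is the Claim_ definition above) =====
theorem transform_back_spec : Claim_equal_transform_back := by
  intro board direction _ hpre
  exact transform_back_spec_aux board direction hpre
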